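-- pv_equiv track=rewrite | github.com/SpceForMind/AADS_CR | fano_shano.py | summ_after_key
-- ===== SOURCE A (Python) =====
-- def summ_after_key(symbols, key):
--     summ = 0
--     summ_flag = False
--     for cur_key in symbols.keys():
--         if summ_flag:
--             summ += symbols[cur_key]
--         if cur_key == key:
--             summ_flag = True
--     return summ
-- ===== SOURCE B (Python) =====
-- def summ_after_key(symbols, key):
--     keys = list(symbols)
--     if key not in keys:
--         return 0
--     i = keys.index(key)
--     return sum(symbols[k] for k in keys[i+1:])
-- ===== Notes on version B (the rewrite author's own statement) =====
-- stated objective: simpler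
-- what changed: Replaces the flag-driven single scan (accumulate-after-a-boolean-trips) by a two-phase locate-then-sum: find the key's index, then sum the values of the suffix of keys after it (0 if the key is absent).
import Mathlib
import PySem

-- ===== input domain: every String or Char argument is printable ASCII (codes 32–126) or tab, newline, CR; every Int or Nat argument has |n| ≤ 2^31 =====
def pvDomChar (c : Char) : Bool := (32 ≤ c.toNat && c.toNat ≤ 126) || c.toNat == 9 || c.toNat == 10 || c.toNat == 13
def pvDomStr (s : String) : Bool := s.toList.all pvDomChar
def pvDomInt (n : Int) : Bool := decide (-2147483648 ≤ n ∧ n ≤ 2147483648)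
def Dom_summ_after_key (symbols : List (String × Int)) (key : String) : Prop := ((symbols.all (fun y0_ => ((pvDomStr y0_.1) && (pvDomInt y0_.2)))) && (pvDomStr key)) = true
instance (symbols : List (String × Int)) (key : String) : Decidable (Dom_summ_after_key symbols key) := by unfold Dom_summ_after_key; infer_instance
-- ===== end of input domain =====

-- B replaces A's flag-driven accumulate-after-the-key scan by a two-phase
-- locate-then-sum-the-suffix computation (objective: simpler decomposition).

-- dict lookup symbols[k] (first match in insertion order), used by both Pythons
def pvGetV (symbols : List (String × Int)) (k : String) : Int :=
  (symbols.lookup k).getD 0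

-- ===== PORT A =====
def summ_after_key (symbols : List (String × Int)) (key : String) : Int :=
  (symbols.foldl
    (fun (st : Int × Bool) kv =>
      (if st.2 then st.1 + pvGetV symbols kv.1 else st.1, st.2 || (kv.1 == key)))
    (0, false)).1

-- ===== PORT B =====
def summ_after_key_alt (symbols : List (String × Int)) (key : String) : Int :=
  let keys := symbols.map Prod.fst
  match PySem.List.index? keys key with
  | none => 0
  | some i =>
      (PySem.List.slice keys (some ((i : Int) + 1)) none).foldl
        (fun acc k => acc + pvGetV symbols k) 0

-- ===== PRECONDITION & SPEC =====
def Spec_summ_after_key (symbols : List (String × Int)) (key : String) (out : Int) : Prop := out = summ_after_key_alt symbols key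
instance (symbols : List (String × Int)) (key : String) (out : Int) : Decidable (Spec_summ_after_key symbols key out) := by unfold Spec_summ_after_key; infer_instance

-- ===== CLAIM (what is proved, stated in full; the proofs are below) =====
def Claim_equal_summ_after_key : Prop := ∀ (symbols : List (String × Int)) (key : String), Dom_summ_after_key symbols key → Spec_summ_after_key symbols key (summ_after_key symbols key)

-- ===== LEMMAS AND PROOFS =====

theorem pv_foldl_add_gen (f : String → Int) :
    ∀ (xs : List String) (acc : Int),
      xs.foldl (fun a k => a + f k) acc = acc + (xs.map f).sum := by
  intro xs
  induction xs with
  | nil => intro acc; simp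
  | cons x t ih => intro acc; simp [List.foldl, ih]; ring

theorem pv_foldl_flag_true (f : String → Int) (key : String) :
    ∀ (l : List (String × Int)) (acc : Int),
      (l.foldl
        (fun (st : Int × Bool) kv =>
          (if st.2 then st.1 + f kv.1 else st.1, st.2 || (kv.1 == key)))
        (acc, true))
      = (acc + ((l.map Prod.fst).map f).sum, true) := by
  intro l
  induction l with
  | nil => intro acc; simp
  | cons kv t ih => intro acc; simp [List.foldl, ih]; ring

theorem pv_foldl_flag_false (f : String → Int) (key : String) :
    ∀ (l : List (String × Int)),
      ((l.foldl
        (fun (st : Int × Bool) kv =>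
          (if st.2 then st.1 + f kv.1 else st.1, st.2 || (kv.1 == key)))
        (0, false)).1)
      = match PySem.List.index? (l.map Prod.fst) key with
        | none => 0
        | some i => (((l.map Prod.fst).drop (i + 1)).map f).sum := by
  intro l
  induction l with
  | nil => simp [PySem.List.index?]
  | cons kv t ih =>
      by_cases h : kv.1 = key
      · have hb : (kv.1 == key) = true := by simp [h]
        simp only [List.foldl, List.map_cons]
        rw [h] at hb ⊢
        rw [PySem.List.index?_cons_self]
        simp [pv_foldl_flag_true f key t 0]
      · have hb : (kv.1 == key) = false := by simp [h]
        simp only [List.foldl, List.map_cons]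
        rw [PySem.List.index?_cons_of_ne _ h]
        cases hidx : PySem.List.index? (t.map Prod.fst) key with
        | none =>
            have ih' := ih
            rw [hidx] at ih'
            simp only [Option.map_none]
            simpa [hb] using ih'
        | some i =>
            have ih' := ih
            rw [hidx] at ih'
            simp only [Option.map_some]
            simpa [hb] using ih'

theorem alt_eq_match (symbols : List (String × Int)) (key : String) :
    summ_after_key_alt symbols key
      = match PySem.List.index? (symbols.map Prod.fst) key with
        | none => 0
        | some i => (((symbols.map Prod.fst).drop (i + 1)).map (pvGetV symbols)).sum := by
  unfold summ_after_key_alt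
  cases hidx : PySem.List.index? (symbols.map Prod.fst) key with
  | none => simp only [hidx]
  | some i =>
      simp only [hidx]
      rw [PySem.List.slice_from _ (by positivity : (0:Int) ≤ (i : Int) + 1)]
      have ht : ((i : Int) + 1).toNat = i + 1 := by omega
      rw [ht, pv_foldl_add_gen]
      simp

-- ===== VERDICT (by name: the statement is the Claim_ definition above) =====
theorem summ_after_key_spec : Claim_equal_summ_after_key := by
  intro symbols key _
  unfold Spec_summ_after_key summ_after_key
  rw [alt_eq_match symbols key]
  exact pv_foldl_flag_false (pvGetV symbols) key symbols
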